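-- pv_equiv track=rewrite | github.com/zackjh/roundabarter | server/scraper.py | get_simple_listing_url
-- ===== SOURCE A (Python) =====
-- def get_simple_listing_url(original_url):
--     """Simplfies a Carousell listing URL by using only the listing ID."""
--     original_url_reversed = original_url[::-1]
--
--     listing_id = ""
--     for char in original_url_reversed:
--         if char == "-":
--             break
--
--         if char.isdigit():
--             listing_id = char + listing_id
--
--     return f"https://www.carousell.sg/p/{listing_id}/"
-- ===== SOURCE B (Python) =====
-- def get_simple_listing_url(original_url):
--     """Simplfies a Carousell listing URL by using only the listing ID."""
--     idx = original_url.rfind("-")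
--     tail = original_url[idx + 1:]
--     listing_id = "".join(c for c in tail if c.isdigit())
--     return f"https://www.carousell.sg/p/{listing_id}/"
-- ===== Notes on version B (the rewrite author's own statement) =====
-- stated objective: simpler
-- what changed: Replaces A's reverse-the-string-and-break scan with prepend accumulation by locating the last hyphen via rfind, slicing the suffix after it, and filtering the digits in a single forward pass.
import Mathlib
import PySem

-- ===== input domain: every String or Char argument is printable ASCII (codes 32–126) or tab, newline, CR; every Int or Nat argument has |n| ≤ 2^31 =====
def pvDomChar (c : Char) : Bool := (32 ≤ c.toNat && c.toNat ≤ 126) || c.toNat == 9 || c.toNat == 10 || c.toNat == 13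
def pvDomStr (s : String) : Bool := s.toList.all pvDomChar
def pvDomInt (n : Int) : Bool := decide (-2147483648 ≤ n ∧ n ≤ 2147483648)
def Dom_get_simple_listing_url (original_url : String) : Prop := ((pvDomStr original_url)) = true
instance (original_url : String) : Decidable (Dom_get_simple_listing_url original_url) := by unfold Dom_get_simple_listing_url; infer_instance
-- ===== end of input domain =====

-- B replaces A's reverse-and-break scan by rfind-the-last-hyphen, take the suffix, and filter digits (simpler decomposition; same cost).

-- ===== PORT A =====
-- the for-loop with break: walks the reversed characters, prepending digits until a '-'
def pvA_loop : List Char → List Char → List Char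
  | [], listing_id => listing_id
  | c :: rest, listing_id =>
    if c = '-' then listing_id
    else if PySem.Chars.isdigit c then pvA_loop rest (c :: listing_id)
    else pvA_loop rest listing_id

def get_simple_listing_url (original_url : String) : String :=
  let original_url_reversed := (PySem.Chars.slice? original_url.toList none none (-1)).getD []
  let listing_id := pvA_loop original_url_reversed []
  String.ofList ("https://www.carousell.sg/p/".toList ++ listing_id ++ "/".toList)

-- ===== PORT B =====
def get_simple_listing_url_alt (original_url : String) : String :=
  let idx := PySem.Str.rfind original_url "-"
  let tail := PySem.List.slice original_url.toList (some (idx + 1)) none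
  let listing_id := tail.filter PySem.Chars.isdigit
  String.ofList ("https://www.carousell.sg/p/".toList ++ listing_id ++ "/".toList)

-- ===== PRECONDITION & SPEC =====
def Spec_get_simple_listing_url (original_url : String) (out : String) : Prop := out = get_simple_listing_url_alt original_url
instance (original_url : String) (out : String) : Decidable (Spec_get_simple_listing_url original_url out) := by unfold Spec_get_simple_listing_url; infer_instance

-- ===== CLAIM (what is proved, stated in full; the proofs are below) =====
def Claim_equal_get_simple_listing_url : Prop := ∀ (original_url : String), Dom_get_simple_listing_url original_url → Spec_get_simple_listing_url original_url (get_simple_listing_url original_url)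

-- ===== LEMMAS AND PROOFS =====

theorem pvA_loop_eq (r listing_id : List Char) :
    pvA_loop r listing_id =
      ((r.takeWhile (· ≠ '-')).filter PySem.Chars.isdigit).reverse ++ listing_id := by
  induction r generalizing listing_id with
  | nil => simp [pvA_loop]
  | cons c rest ih =>
    by_cases hc : c = '-'
    · simp [pvA_loop, hc]
    · by_cases hd : PySem.Chars.isdigit c
      all_goals simp [pvA_loop, hc, hd, ih]

theorem pv_go_zero (l sub : List Char) :
    PySem.Chars.rfind.go l sub 0 = if sub.isPrefixOf l then 0 else -1 := by
  simp [PySem.Chars.rfind.go]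

theorem pv_go_succ (l sub : List Char) (j : Nat) :
    PySem.Chars.rfind.go l sub (j + 1) =
      if sub.isPrefixOf (l.drop (j + 1)) then ((j : Int) + 1) else PySem.Chars.rfind.go l sub j := by
  simp [PySem.Chars.rfind.go]

theorem pv_go_ge (l sub : List Char) (k : Nat) : -1 ≤ PySem.Chars.rfind.go l sub k := by
  induction k with
  | zero => rw [pv_go_zero]; split <;> omega
  | succ j ih => rw [pv_go_succ]; split <;> omega

theorem pv_go_lt (l : List Char) (k : Nat) :
    PySem.Chars.rfind.go l ['-'] k + 1 ≤ (l.length : Int) := by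
  induction k with
  | zero =>
    rw [pv_go_zero]
    by_cases h : (['-']).isPrefixOf l = true
    · rw [if_pos h]
      have hne : l ≠ [] := by rintro rfl; simp [List.isPrefixOf] at h
      have := List.length_pos_iff.mpr hne
      omega
    · rw [if_neg h]; omega
  | succ j ih =>
    rw [pv_go_succ]
    by_cases h : (['-']).isPrefixOf (l.drop (j + 1)) = true
    · rw [if_pos h]
      have hne : l.drop (j + 1) ≠ [] := by rintro he; rw [he] at h; simp [List.isPrefixOf] at h
      have : j + 1 < l.length := by
        by_contra hle
        exact hne (List.drop_eq_nil_of_le (by omega))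
      omega
    · rw [if_neg h]; exact ih

theorem pv_rfind_ge (l : List Char) : -1 ≤ PySem.Chars.rfind l ['-'] := pv_go_ge l ['-'] l.length

theorem pv_rfind_lt (l : List Char) : PySem.Chars.rfind l ['-'] + 1 ≤ (l.length : Int) :=
  pv_go_lt l l.length

-- appending the hyphen: rfind finds it at the end
theorem pv_go_at_hyphen (l : List Char) :
    PySem.Chars.rfind.go (l ++ ['-']) ['-'] l.length = (l.length : Int) := by
  cases hl : l.length with
  | zero =>
    have : l = [] := List.eq_nil_of_length_eq_zero hl
    subst this
    rw [pv_go_zero]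
    simp [List.isPrefixOf]
  | succ j =>
    rw [pv_go_succ]
    have hdrop : (l ++ ['-']).drop (j + 1) = ['-'] := by
      rw [← hl]
      simp
    rw [hdrop, if_pos (by simp [List.isPrefixOf])]
    omega

theorem pv_rfind_append_hyphen (l : List Char) :
    PySem.Chars.rfind (l ++ ['-']) ['-'] = (l.length : Int) := by
  show PySem.Chars.rfind.go (l ++ ['-']) ['-'] (l ++ ['-']).length = _
  have hlen : (l ++ ['-']).length = l.length + 1 := by simp
  rw [hlen, pv_go_succ]
  have hdrop : (l ++ ['-']).drop (l.length + 1) = [] := List.drop_eq_nil_of_le (by simp)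
  rw [hdrop, if_neg (by simp [List.isPrefixOf])]
  exact pv_go_at_hyphen l

-- appending a non-hyphen char does not change where the last hyphen is
theorem pv_go_append (l : List Char) (c : Char) (hc : c ≠ '-') (k : Nat) (hk : k ≤ l.length) :
    PySem.Chars.rfind.go (l ++ [c]) ['-'] k = PySem.Chars.rfind.go l ['-'] k := by
  induction k with
  | zero =>
    rw [pv_go_zero, pv_go_zero]
    congr 1
    cases l with
    | nil => simp [List.isPrefixOf, Ne.symm hc]
    | cons a t => simp [List.isPrefixOf]
  | succ j ih =>
    rw [pv_go_succ, pv_go_succ, ih (by omega)]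
    congr 1
    have hdrop : (l ++ [c]).drop (j + 1) = l.drop (j + 1) ++ [c] :=
      List.drop_append_of_le_length (by omega)
    rw [hdrop]
    cases h : l.drop (j + 1) with
    | nil => simp [List.isPrefixOf, Ne.symm hc]
    | cons a t => simp [List.isPrefixOf]

theorem pv_rfind_append (l : List Char) (c : Char) (hc : c ≠ '-') :
    PySem.Chars.rfind (l ++ [c]) ['-'] = PySem.Chars.rfind l ['-'] := by
  show PySem.Chars.rfind.go (l ++ [c]) ['-'] (l ++ [c]).length = PySem.Chars.rfind.go l ['-'] l.length
  rw [List.length_append]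
  simp only [List.length_cons, List.length_nil]
  rw [pv_go_succ]
  have hdrop : (l ++ [c]).drop (l.length + 1) = [] := List.drop_eq_nil_of_le (by simp)
  rw [hdrop, if_neg (by simp [List.isPrefixOf])]
  exact pv_go_append l c hc l.length le_rfl

-- the suffix after the last hyphen, two ways
theorem pv_suffix_eq (l : List Char) :
    (l.reverse.takeWhile (· ≠ '-')).reverse =
      l.drop (PySem.Chars.rfind l ['-'] + 1).toNat := by
  induction l using List.reverseRecOn with
  | nil => simp [PySem.Chars.rfind, pv_go_zero, List.isPrefixOf]
  | append_singleton l c ih =>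
    by_cases hc : c = '-'
    · subst hc
      rw [pv_rfind_append_hyphen]
      simp
    · rw [pv_rfind_append l c hc]
      have hge := pv_rfind_ge l
      have hlt := pv_rfind_lt l
      have hk : (PySem.Chars.rfind l ['-'] + 1).toNat ≤ l.length := by omega
      rw [List.reverse_append]
      simp only [List.reverse_singleton, List.singleton_append]
      rw [List.takeWhile_cons, if_pos (by simpa using hc)]
      rw [List.reverse_cons, ih, List.drop_append_of_le_length hk]

-- ===== VERDICT (by name: the statement is the Claim_ definition above) =====
theorem get_simple_listing_url_spec : Claim_equal_get_simple_listing_url := by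
  intro s _
  show get_simple_listing_url s = get_simple_listing_url_alt s
  unfold get_simple_listing_url get_simple_listing_url_alt
  simp only [PySem.Chars.slice?_eq_listSlice?, PySem.List.slice?_none_none_neg_one,
    Option.getD_some, PySem.Str.rfind_eq]
  rw [show ("-".toList) = ['-'] from rfl]
  rw [PySem.List.slice_from _ (by have := pv_rfind_ge s.toList; omega)]
  congr 1
  congr 1
  rw [pvA_loop_eq, List.append_nil, ← List.filter_reverse, pv_suffix_eq]
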